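-- pv_equiv track=rewrite | github.com/DHWill/bird_converter | birdToBearStateMachine copy.py | combineSameValuesInListIsListContainsSameValues
-- ===== SOURCE A (Python) =====
-- def combineSameValuesInListIsListContainsSameValues(inLists):
--     result = []
--     resultOutOut = []
--     for k in inLists:
--         resultComp = k
--         for m in inLists:
--             isIn = False
--             for t in m:
--                 if(t in k):
--                     isIn = True
--                     break
--             if(isIn):
--                 in_first = set(k)
--                 in_second = set(m)
--                 in_second_but_not_in_first = in_second - in_first
--                 result = k + list(in_second_but_not_in_first)
--                 if(len(result) > len(resultComp)):
--                     resultComp = result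
--
--         uniques = list(set(resultComp))
--         sortedResult = tuple(sorted(uniques))
--         if(sortedResult not in resultOutOut):
--             resultOutOut.append(sortedResult)
--     return resultOutOut
-- ===== SOURCE B (Python) =====
-- def combineSameValuesInListIsListContainsSameValues(inLists):
--     # inverted index: element -> ascending list of indices of lists containing it
--     index = {}
--     for j, m in enumerate(inLists):
--         for x in set(m):
--             index.setdefault(x, []).append(j)
--     out = []
--     for k in inLists:
--         sk = set(k)
--         cand = set()
--         for x in sk:
--             cand.update(index.get(x, []))
--         best_added = 0
--         best = -1
--         for j in sorted(cand):
--             added = len(set(inLists[j]) - sk)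
--             if added > best_added:
--                 best_added = added
--                 best = j
--         merged = sk if best < 0 else sk | set(inLists[best])
--         t = tuple(sorted(merged))
--         if t not in out:
--             out.append(t)
--     return out
-- ===== Notes on version B (the rewrite author's own statement) =====
-- stated objective: faster
-- what changed: Replaced A's cubic rescan (for every list, re-scan every other list element-by-element for overlap and rebuild set differences) with an inverted index from element to the ascending indices of lists containing it, so each list only examines the candidate lists its own elements point to.
import Mathlib
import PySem

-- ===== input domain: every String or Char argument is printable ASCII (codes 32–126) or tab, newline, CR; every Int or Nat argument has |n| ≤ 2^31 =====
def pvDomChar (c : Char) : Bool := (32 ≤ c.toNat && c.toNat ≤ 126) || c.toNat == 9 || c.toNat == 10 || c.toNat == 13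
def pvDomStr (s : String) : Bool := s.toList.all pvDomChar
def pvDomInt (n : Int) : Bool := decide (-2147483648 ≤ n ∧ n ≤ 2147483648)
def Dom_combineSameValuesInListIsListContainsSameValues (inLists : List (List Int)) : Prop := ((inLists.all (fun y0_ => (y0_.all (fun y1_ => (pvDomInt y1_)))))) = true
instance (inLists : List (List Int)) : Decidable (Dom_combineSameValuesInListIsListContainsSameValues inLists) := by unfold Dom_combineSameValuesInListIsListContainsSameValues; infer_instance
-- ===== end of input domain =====

-- B replaces A's cubic all-pairs rescanning with an inverted index (element -> indices of lists containing it);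
-- candidates per list come from the index and merging uses sets; objective: faster by a different algorithm.


-- ===== PORT A =====
-- inner loop over m (the break-on-first-hit 'isIn' scan is List.any).
-- Python's 'list(in_second_but_not_in_first)' iterates a set (hash order); here it is the
-- deterministic PySem.Set.diff list — exact because 'result' is consumed only through its
-- length and through set(resultComp), both order-independent (likewise 'list(set(resultComp))'
-- only feeds sorted()).
def pvInnerA (inLists : List (List Int)) (k : List Int) : List Int :=
  inLists.foldl (fun resultComp m =>
    let isIn := m.any (fun t => decide (t ∈ k))
    if isIn then
      let result := k ++ PySem.Set.diff (PySem.Set.ofList m) (PySem.Set.ofList k)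
      if result.length > resultComp.length then result else resultComp
    else resultComp) k

def combineSameValuesInListIsListContainsSameValues (inLists : List (List Int)) : List (List Int) :=
  inLists.foldl (fun resultOutOut k =>
    let resultComp := pvInnerA inLists k
    let uniques := PySem.Set.ofList resultComp
    let sortedResult := PySem.List.sorted uniques (fun x => x)
    if sortedResult ∈ resultOutOut then resultOutOut else resultOutOut ++ [sortedResult]) []

-- ===== PORT B =====
-- index.setdefault(x, []).append(j) is Dict.modify with default [].
def pvIndexB (inLists : List (List Int)) : PySem.Dict Int (List Int) :=
  (PySem.List.enumerate inLists).foldl (fun d jm =>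
    (PySem.Set.ofList jm.2).foldl (fun d x => d.modify x [] (fun l => l ++ [jm.1])) d)
    PySem.Dict.empty

-- the best-candidate scan over sorted(cand); inLists[j] is pyGetD with default [] (j is always in range here)
def pvBestB (inLists : List (List Int)) (sk : PySem.Set Int) (cand : List Int) : Int × Int :=
  cand.foldl (fun bp j =>
    let added := PySem.Set.len (PySem.Set.diff (PySem.Set.ofList (PySem.List.pyGetD inLists j [])) sk)
    if added > bp.1 then (added, j) else bp) (0, -1)

def pvProcessB (inLists : List (List Int)) (index : PySem.Dict Int (List Int)) (k : List Int) : List Int :=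
  let sk := PySem.Set.ofList k
  let cand := sk.foldl (fun c x => PySem.Set.update c (index.getD x [])) PySem.Set.empty
  let bp := pvBestB inLists sk (PySem.List.sorted cand (fun x => x))
  let merged := if bp.2 < 0 then sk else PySem.Set.union sk (PySem.Set.ofList (PySem.List.pyGetD inLists bp.2 []))
  PySem.List.sorted merged (fun x => x)

def combineSameValuesInListIsListContainsSameValues_alt (inLists : List (List Int)) : List (List Int) :=
  let index := pvIndexB inLists
  inLists.foldl (fun out k =>
    let t := pvProcessB inLists index k
    if t ∈ out then out else out ++ [t]) []

-- ===== PRECONDITION & SPEC =====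
def Spec_combineSameValuesInListIsListContainsSameValues (inLists : List (List Int)) (out : List (List Int)) : Prop := out = combineSameValuesInListIsListContainsSameValues_alt inLists
instance (inLists : List (List Int)) (out : List (List Int)) : Decidable (Spec_combineSameValuesInListIsListContainsSameValues inLists out) := by unfold Spec_combineSameValuesInListIsListContainsSameValues; infer_instance

-- ===== CLAIM (what is proved, stated in full; the proofs are below) =====
def Claim_equal_combineSameValuesInListIsListContainsSameValues : Prop := ∀ (inLists : List (List Int)), Dom_combineSameValuesInListIsListContainsSameValues inLists → Spec_combineSameValuesInListIsListContainsSameValues inLists (combineSameValuesInListIsListContainsSameValues inLists)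

-- ===== LEMMAS AND PROOFS =====

-- the set-difference list of candidate j against k
def pvDiffL (inLists : List (List Int)) (k : List Int) (j : Int) : List Int :=
  PySem.Set.diff (PySem.Set.ofList (PySem.List.pyGetD inLists j [])) (PySem.Set.ofList k)

-- A's resultComp as a function of B's (best_added, best) pair
def pvMerge (inLists : List (List Int)) (k : List Int) (bp : Int × Int) : List Int :=
  if bp.2 < 0 then k else k ++ pvDiffL inLists k bp.2

-- ascending list of indices of lists overlapping k
def pvC (inLists : List (List Int)) (k : List Int) : List Int :=
  (PySem.List.pyRange 0 (inLists.length : Int)).filter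
    (fun j => (PySem.List.pyGetD inLists j []).any (fun t => decide (t ∈ k)))

-- effect of the per-list posting update on one key
theorem pv_modify_fold (s : List Int) (hs : s.Nodup) (j : Int)
    (d : PySem.Dict Int (List Int)) (x : Int) :
    ((s.foldl (fun d y => d.modify y [] (fun l => l ++ [j])) d).getD x []) =
      (if x ∈ s then d.getD x [] ++ [j] else d.getD x []) := by
  induction s generalizing d with
  | nil => simp
  | cons y t ih =>
    simp only [List.foldl_cons]
    rw [ih (List.nodup_cons.mp hs).2]
    by_cases hxy : x = y
    · subst hxy
      have hxt : x ∉ t := (List.nodup_cons.mp hs).1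
      simp [hxt]
    · simp [hxy, PySem.Dict.getD_modify]

-- membership in the enumerate list
theorem pv_mem_enum (l : List (List Int)) (s : Int) (p : Int × List Int) :
    p ∈ PySem.List.enumerate l s ↔ ∃ i : Nat, i < l.length ∧ p = (s + i, l.getD i []) := by
  induction l generalizing s with
  | nil => simp [PySem.List.enumerate]
  | cons m t ih =>
    simp only [PySem.List.enumerate, List.mem_cons, ih]
    constructor
    · rintro (rfl | ⟨i, hi, rfl⟩)
      · exact ⟨0, by simp⟩
      · exact ⟨i + 1, by simpa using hi, by simp; ring⟩
    · rintro ⟨i, hi, rfl⟩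
      cases i with
      | zero => left; simp
      | succ i => right; exact ⟨i, by simpa using hi, by simp; ring⟩

-- cumulative contents of the inverted-index fold at one key
theorem pv_index_fold (e : List (Int × List Int)) (d : PySem.Dict Int (List Int)) (x : Int) :
    ((e.foldl (fun d jm =>
        (PySem.Set.ofList jm.2).foldl (fun d y => d.modify y [] (fun l => l ++ [jm.1])) d) d).getD x []) =
      d.getD x [] ++ (e.filter (fun jm => decide (x ∈ jm.2))).map (·.1) := by
  induction e generalizing d with
  | nil => simp
  | cons jm t ih =>
    simp only [List.foldl_cons, ih, List.filter_cons]
    rw [pv_modify_fold _ (PySem.Set.nodup_ofList _)]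
    by_cases hx : x ∈ jm.2 <;> simp [hx, PySem.Set.mem_ofList]

-- what the inverted index holds, as a membership statement
theorem pv_index_mem (inLists : List (List Int)) (x j : Int) :
    j ∈ (pvIndexB inLists).getD x [] ↔
      ∃ i : Nat, i < inLists.length ∧ j = (i : Int) ∧ x ∈ inLists.getD i [] := by
  unfold pvIndexB
  rw [pv_index_fold]
  simp only [PySem.Dict.getD_empty, List.nil_append, List.mem_map, List.mem_filter]
  constructor
  · rintro ⟨p, ⟨hp, hx⟩, rfl⟩
    obtain ⟨i, hi, rfl⟩ := (pv_mem_enum _ _ _).mp hp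
    exact ⟨i, hi, by simp, by simpa using hx⟩
  · rintro ⟨i, hi, rfl, hx⟩
    exact ⟨((i : Int), inLists.getD i []), ⟨(pv_mem_enum _ _ _).mpr ⟨i, hi, by simp⟩, by simpa using hx⟩, rfl⟩

-- membership in the candidate-set fold
theorem pv_cand_fold_mem (g : Int → List Int) (s : List Int) (c0 : PySem.Set Int) (j : Int) :
    j ∈ s.foldl (fun c x => PySem.Set.update c (g x)) c0 ↔ j ∈ c0 ∨ ∃ x ∈ s, j ∈ g x := by
  induction s generalizing c0 with
  | nil => simp
  | cons y t ih =>
    simp only [List.foldl_cons, ih, PySem.Set.mem_update, List.mem_cons]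
    constructor
    · rintro ((h | h) | ⟨x, hx, hj⟩)
      · exact Or.inl h
      · exact Or.inr ⟨y, Or.inl rfl, h⟩
      · exact Or.inr ⟨x, Or.inr hx, hj⟩
    · rintro (h | ⟨x, (rfl | hx), hj⟩)
      · exact Or.inl (Or.inl h)
      · exact Or.inl (Or.inr hj)
      · exact Or.inr ⟨x, hx, hj⟩

theorem pv_cand_fold_nodup (g : Int → List Int) (s : List Int) (c0 : PySem.Set Int)
    (h : c0.Nodup) : (s.foldl (fun c x => PySem.Set.update c (g x)) c0).Nodup := by
  induction s generalizing c0 with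
  | nil => exact h
  | cons y t ih => exact ih _ (PySem.Set.nodup_update _ _ h)

-- pvC is strictly ascending
theorem pv_pvC_pairwise (inLists : List (List Int)) (k : List Int) :
    (pvC inLists k).Pairwise (· < ·) := by
  unfold pvC
  apply List.Pairwise.filter
  rw [show ((inLists.length : Int)) = ((inLists.length : Nat) : Int) from rfl,
    PySem.List.pyRange_zero_natCast]
  exact (List.pairwise_map.mpr (List.pairwise_lt_range.imp (by intro a b h; exact_mod_cast h)))

-- membership in pvC
theorem pv_pvC_mem (inLists : List (List Int)) (k : List Int) (j : Int) :
    j ∈ pvC inLists k ↔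
      ∃ i : Nat, i < inLists.length ∧ j = (i : Int) ∧ ∃ x ∈ k, x ∈ inLists.getD i [] := by
  unfold pvC
  simp only [List.mem_filter, PySem.List.mem_pyRange_one, List.any_eq_true, decide_eq_true_eq]
  constructor
  · rintro ⟨⟨h0, hn⟩, t, ht, hk⟩
    refine ⟨j.toNat, by omega, by omega, t, hk, ?_⟩
    have : j = ((j.toNat : Nat) : Int) := by omega
    rwa [this, PySem.List.pyGetD_natCast] at ht
  · rintro ⟨i, hi, rfl, x, hx, hm⟩
    rw [PySem.List.pyGetD_natCast]
    exact ⟨⟨by positivity, by exact_mod_cast hi⟩, x, hm, hx⟩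

-- the sorted candidate set IS the ascending filtered index list
theorem pv_sorted_cand (inLists : List (List Int)) (k : List Int) :
    PySem.List.sorted ((PySem.Set.ofList k).foldl
        (fun c x => PySem.Set.update c ((pvIndexB inLists).getD x [])) PySem.Set.empty)
      (fun x => x) = pvC inLists k := by
  have hmem : ∀ j, (j ∈ (PySem.Set.ofList k).foldl
      (fun c x => PySem.Set.update c ((pvIndexB inLists).getD x [])) PySem.Set.empty) ↔
      j ∈ pvC inLists k := by
    intro j
    rw [pv_pvC_mem, pv_cand_fold_mem]
    simp only [PySem.Set.mem_ofList]
    constructor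
    · rintro (h | ⟨x, hx, hj⟩)
      · simp [PySem.Set.empty] at h
      · obtain ⟨i, hi, rfl, hm⟩ := (pv_index_mem inLists x j).mp hj
        exact ⟨i, hi, rfl, x, hx, hm⟩
    · rintro ⟨i, hi, rfl, x, hx, hm⟩
      exact Or.inr ⟨x, hx, (pv_index_mem inLists x _).mpr ⟨i, hi, rfl, hm⟩⟩
  have hpw := pv_pvC_pairwise inLists k
  apply PySem.List.sorted_eq_of_perm_of_pairwise_lt
  · exact (List.perm_ext_iff_of_nodup
      (List.Pairwise.imp (fun h => ne_of_lt h) hpw)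
      (pv_cand_fold_nodup _ _ _ (by simp [PySem.Set.empty]))).mpr
      (fun j => (hmem j).symm)
  · exact hpw

-- a fold ignores elements on which it is the identity
theorem pv_foldl_filter {α β : Type} (f : β → α → β) (p : α → Bool) :
    ∀ (l : List α) (a : β), (∀ b x, x ∈ l → p x = false → f b x = b) →
    l.foldl f a = (l.filter p).foldl f a := by
  intro l
  induction l with
  | nil => intros; rfl
  | cons y t ih =>
    intro a h
    by_cases hp : p y = true
    · simp [hp]
      exact ih _ (fun b x hx => h b x (List.mem_cons_of_mem _ hx))
    · simp at hp
      simp [hp, h a y (List.mem_cons_self) hp]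
      exact ih _ (fun b x hx => h b x (List.mem_cons_of_mem _ hx))

-- paired fold under a relation
theorem pv_foldl_rel {α β γ : Type} {R : β → γ → Prop} (f : β → α → β) (g : γ → α → γ) :
    ∀ (l : List α) (a : β) (b : γ), R a b → (∀ a b x, x ∈ l → R a b → R (f a x) (g b x)) →
    R (l.foldl f a) (l.foldl g b) := by
  intro l
  induction l with
  | nil => intro a b h _; exact h
  | cons y t ih =>
    intro a b h hstep
    exact ih _ _ (hstep a b y (List.mem_cons_self) h)
      (fun a b x hx => hstep a b x (List.mem_cons_of_mem _ hx))

-- A's inner loop, re-indexed over positions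
theorem pv_innerA_range (inLists : List (List Int)) (k : List Int) :
    pvInnerA inLists k =
      (PySem.List.pyRange 0 (inLists.length : Int)).foldl (fun resultComp j =>
        let m := PySem.List.pyGetD inLists j []
        let isIn := m.any (fun t => decide (t ∈ k))
        if isIn then
          let result := k ++ PySem.Set.diff (PySem.Set.ofList m) (PySem.Set.ofList k)
          if result.length > resultComp.length then result else resultComp
        else resultComp) k := by
  unfold pvInnerA
  conv_lhs => rw [← PySem.List.map_pyGetD_pyRange_zero inLists []]
  rw [List.foldl_map]
  rfl

-- the per-k value computed by A equals the one computed by B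
theorem pv_perK (inLists : List (List Int)) (k : List Int) :
    PySem.List.sorted (PySem.Set.ofList (pvInnerA inLists k)) (fun x => x) =
      pvProcessB inLists (pvIndexB inLists) k := by
  simp only [pvProcessB]
  rw [pv_sorted_cand inLists k]
  have hR : pvInnerA inLists k = pvMerge inLists k (pvBestB inLists (PySem.Set.ofList k) (pvC inLists k)) ∧
      ((pvInnerA inLists k).length : Int) =
        (k.length : Int) + (pvBestB inLists (PySem.Set.ofList k) (pvC inLists k)).1 := by
    rw [pv_innerA_range]
    rw [pv_foldl_filter _ (fun j => (PySem.List.pyGetD inLists j []).any (fun t => decide (t ∈ k)))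
      _ _ (by intro b x _ hx; simp [hx])]
    unfold pvBestB
    refine pv_foldl_rel
      (R := fun a bp => a = pvMerge inLists k bp ∧ ((a.length : Int) = (k.length : Int) + bp.1))
      _ _ (pvC inLists k) k ((0 : Int), (-1 : Int))
      ⟨by simp [pvMerge], by simp⟩ ?_
    intro a bp j hj hab
    obtain ⟨h1, h2⟩ := hab
    have hjpos : 0 ≤ j := by
      obtain ⟨i, _, rfl, _⟩ := (pv_pvC_mem inLists k j).mp hj
      positivity
    have hin : (PySem.List.pyGetD inLists j []).any (fun t => decide (t ∈ k)) = true := by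
      unfold pvC at hj
      exact (List.mem_filter.mp hj).2
    simp only [hin, if_true]
    have hlen : ((k ++ PySem.Set.diff (PySem.Set.ofList (PySem.List.pyGetD inLists j []))
          (PySem.Set.ofList k)).length > a.length) ↔
        ((PySem.Set.len (PySem.Set.diff (PySem.Set.ofList (PySem.List.pyGetD inLists j []))
          (PySem.Set.ofList k))) > bp.1) := by
      simp only [List.length_append, PySem.Set.len, gt_iff_lt]
      omega
    by_cases hc : (PySem.Set.len (PySem.Set.diff (PySem.Set.ofList (PySem.List.pyGetD inLists j []))
        (PySem.Set.ofList k))) > bp.1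
    · rw [if_pos (hlen.mpr hc), if_pos hc]
      constructor
      · simp [pvMerge, pvDiffL, not_lt.mpr hjpos]
      · simp [PySem.Set.len]
    · rw [if_neg (fun h => hc (hlen.mp h)), if_neg hc]
      exact ⟨h1, h2⟩
  obtain ⟨h1, _⟩ := hR
  rw [h1]
  set bp := pvBestB inLists (PySem.Set.ofList k) (pvC inLists k) with hbp
  by_cases hneg : bp.2 < 0
  · simp [pvMerge, hneg]
  · simp only [pvMerge, if_neg hneg]
    apply PySem.List.sorted_eq_sorted_of_perm _ _ _ (fun a b h => h)
    apply (List.perm_ext_iff_of_nodup (PySem.Set.nodup_ofList _)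
      (PySem.Set.nodup_union _ _ (PySem.Set.nodup_ofList _))).mpr
    intro a
    simp only [PySem.Set.mem_ofList, PySem.Set.mem_union, List.mem_append, pvDiffL,
      PySem.Set.mem_diff, PySem.Set.mem_ofList]
    tauto

-- ===== VERDICT (by name: the statement is the Claim_ definition above) =====
theorem combineSameValuesInListIsListContainsSameValues_spec : Claim_equal_combineSameValuesInListIsListContainsSameValues := by
  intro inLists _
  unfold Spec_combineSameValuesInListIsListContainsSameValues
  unfold combineSameValuesInListIsListContainsSameValues combineSameValuesInListIsListContainsSameValues_alt
  simp only [pv_perK]
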